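-- pv_equiv track=rewrite | github.com/KaiTheOcean/SudokuDesign | sudoku.py | row_hint
-- ===== SOURCE A (Python) =====
-- def row_hint(board, position_list):
--     '''Give the user hint of what are the available numbers for this row'''
--
--     # Create a check list
--     check_list = [1, 2, 3, 4, 5, 6, 7, 8, 9]
--
--     # Get the user selected position's row value
--     current_row_index = int(position_list[1])
--     current_row_value = board[current_row_index - 1]
--
--     # Compare with check list, and remove the duplicates
--     for i in range(len(current_row_value)):
--         if current_row_value[i] in check_list:
--             check_list.remove(current_row_value[i])
--
--     # It returns all the possible value for the row
--     return check_list
-- ===== SOURCE B (Python) =====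
-- def row_hint(board, position_list):
--     '''Give the user hint of what are the available numbers for this row'''
--     row_set = set(board[int(position_list[1]) - 1])
--     return [n for n in range(1, 10) if n not in row_set]
-- ===== Notes on version B (the rewrite author's own statement) =====
-- stated objective: idiomatic
-- what changed: Instead of looping over the row's cells and removing each match from a shrinking candidate list (O(9) list scans/removals per cell), B builds a membership set of the row once and filters the fixed candidate range 1..9 by set membership.
import Mathlib
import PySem

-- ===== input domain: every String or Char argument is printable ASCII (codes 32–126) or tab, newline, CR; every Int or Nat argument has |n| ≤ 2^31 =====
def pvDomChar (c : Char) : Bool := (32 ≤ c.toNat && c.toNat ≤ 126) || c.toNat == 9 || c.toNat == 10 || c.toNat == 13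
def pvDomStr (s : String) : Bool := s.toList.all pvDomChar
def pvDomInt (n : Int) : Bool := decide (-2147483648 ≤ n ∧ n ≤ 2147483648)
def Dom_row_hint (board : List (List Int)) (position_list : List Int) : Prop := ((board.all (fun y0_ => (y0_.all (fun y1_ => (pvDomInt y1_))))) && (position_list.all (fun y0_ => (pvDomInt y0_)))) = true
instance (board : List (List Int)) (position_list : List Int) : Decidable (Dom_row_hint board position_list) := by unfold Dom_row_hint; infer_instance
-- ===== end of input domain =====

-- B replaces A's shrinking-candidate-list loop over the row by a one-pass membership set
-- of the row plus a filter over the fixed candidate range 1..9 (objective: more idiomatic).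


-- ===== PORT A =====
def row_hint (board : List (List Int)) (position_list : List Int) : List Int :=
  let check0 : List Int := [1, 2, 3, 4, 5, 6, 7, 8, 9]
  match PySem.List.pyGet? position_list 1 with
  | none => []          -- IndexError: excluded by Pre_row_hint
  | some current_row_index =>
    match PySem.List.pyGet? board (current_row_index - 1) with
    | none => []        -- IndexError: excluded by Pre_row_hint
    | some current_row_value =>
      (PySem.List.pyRange 0 (PySem.List.len current_row_value) 1).foldl
        (fun check_list i =>
          let v := PySem.List.pyGetD current_row_value i 0   -- total form: i ∈ range(len) is in range
          if v ∈ check_list then (PySem.List.remove? check_list v).getD check_list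
          else check_list)
        check0

-- ===== PORT B =====
def row_hint_alt (board : List (List Int)) (position_list : List Int) : List Int :=
  match PySem.List.pyGet? position_list 1 with
  | none => []          -- IndexError: excluded by Pre_row_hint
  | some idx =>
    match PySem.List.pyGet? board (idx - 1) with
    | none => []        -- IndexError: excluded by Pre_row_hint
    | some row =>
      let row_set : PySem.Set Int := PySem.Set.ofList row
      (PySem.List.pyRange 1 10 1).filter (fun n => !(PySem.Set.contains row_set n))

-- ===== PRECONDITION & SPEC =====
-- Pre_ excludes exactly the inputs where Python A raises IndexError: position_list shorter
-- than 2, or the (1-based, possibly negative) row index position_list[1]-1 out of board's range.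
def Pre_row_hint (board : List (List Int)) (position_list : List Int) : Prop :=
  2 ≤ position_list.length ∧
  PySem.Raise.InRange board.length (position_list.getD 1 0 - 1)
instance (board : List (List Int)) (position_list : List Int) : Decidable (Pre_row_hint board position_list) := by unfold Pre_row_hint; infer_instance

def pvWitness_row_hint : List (List Int) × List Int := ([[5, 3, 5], [1, 2]], [0, 1])

def Spec_row_hint (board : List (List Int)) (position_list : List Int) (out : List Int) : Prop := out = row_hint_alt board position_list
instance (board : List (List Int)) (position_list : List Int) (out : List Int) : Decidable (Spec_row_hint board position_list out) := by unfold Spec_row_hint; infer_instance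

-- ===== CLAIM (what is proved, stated in full; the proofs are below) =====
def Claim_equal_row_hint : Prop := ∀ (board : List (List Int)) (position_list : List Int), Dom_row_hint board position_list → Pre_row_hint board position_list → Spec_row_hint board position_list (row_hint board position_list)

-- ===== LEMMAS AND PROOFS =====

-- A's loop step, on any Nodup candidate list, is exactly "drop every occurrence of v".
theorem stepA_eq_filter (cl : List Int) (v : Int) (h : cl.Nodup) :
    (if v ∈ cl then (PySem.List.remove? cl v).getD cl else cl)
      = cl.filter (fun n => !(n == v)) := by
  by_cases hv : v ∈ cl
  · rw [if_pos hv, PySem.List.remove?_eq_some_erase cl v hv]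
    simpa using (List.Nodup.erase_eq_filter h v)
  · rw [if_neg hv, Eq.comm]
    apply List.filter_eq_self.2
    intro a ha
    simp only [Bool.not_eq_eq_eq_not, Bool.not_true, beq_eq_false_iff_ne]
    exact fun e => hv (e ▸ ha)

-- The whole loop: fold A's step over the row = keep the candidates absent from the row.
theorem loopA_eq_filter (row cl : List Int) (h : cl.Nodup) :
    row.foldl
      (fun check_list v =>
        if v ∈ check_list then (PySem.List.remove? check_list v).getD check_list
        else check_list) cl
      = cl.filter (fun n => !(decide (n ∈ row))) := by
  induction row generalizing cl with
  | nil => simp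
  | cons v rest ih =>
    simp only [List.foldl_cons]
    rw [stepA_eq_filter cl v h, ih _ (List.Nodup.filter _ h), List.filter_filter]
    apply List.filter_congr
    intro a _
    by_cases h1 : a = v <;> by_cases h2 : a ∈ rest <;> simp [h1, h2, List.mem_cons]

theorem row_hint_spec : Claim_equal_row_hint := by
  intro board position_list _ hpre
  obtain ⟨hlen, hrange⟩ := hpre
  have h1 : PySem.List.pyGet? position_list 1 = some (position_list.getD 1 0) := by
    have e : (1 : Int) = ((1 : Nat) : Int) := rfl
    rw [e, PySem.List.pyGet?_natCast]
    rcases position_list with _ | ⟨a, _ | ⟨b, t⟩⟩ <;> simp_all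
  obtain ⟨row, h2⟩ : ∃ row, PySem.List.pyGet? board (position_list.getD 1 0 - 1) = some row := by
    rcases hcase : PySem.List.pyGet? board (position_list.getD 1 0 - 1) with _ | row
    · exact absurd hrange ((PySem.List.pyGet?_eq_none_iff _ _).1 hcase)
    · exact ⟨row, rfl⟩
  unfold Spec_row_hint row_hint row_hint_alt
  simp only [h1, h2, PySem.List.len_eq]
  rw [PySem.List.foldl_pyRange_zero_pyGetD' row 0
    (fun check_list v =>
      if v ∈ check_list then (PySem.List.remove? check_list v).getD check_list else check_list)
    [1, 2, 3, 4, 5, 6, 7, 8, 9]]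
  rw [loopA_eq_filter row _ (by decide)]
  have hr : PySem.List.pyRange 1 10 1 = [1, 2, 3, 4, 5, 6, 7, 8, 9] := by decide
  rw [hr]
  apply List.filter_congr
  intro a _
  simp [pysem, PySem.Set.contains]
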